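-- pv_equiv track=rewrite | github.com/ValerioSpagnoli/University | Fondamenti di Informatica 1/Esercitazioni/Esercitazione 7/A_Ex5.py | A_Ex5
-- ===== SOURCE A (Python) =====
-- def A_Ex5(l):
--     c = 0
--     M = []
--     for i in range(len(l)):
--         c = 0
--         L = l[i:i+1]+l[0:i]+l[i+1:len(l)]
--         for j in L:
--             if len(j)==len(l[i]):
--                 c = c+1
--         a = (l[i], c)
--         M.append(a)
--     return M
-- ===== SOURCE B (Python) =====
-- def A_Ex5(l):
--     counts = {}
--     for s in l:
--         k = len(s)
--         counts[k] = counts.get(k, 0) + 1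
--     return [(s, counts[len(s)]) for s in l]
-- ===== Notes on version B (the rewrite author's own statement) =====
-- stated objective: faster
-- what changed: Replaces the per-element rebuild of a rotated copy of the list and its inner counting scan with a single pass that tallies lengths in a dictionary, then a second pass that looks each element's count up.
import Mathlib
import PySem

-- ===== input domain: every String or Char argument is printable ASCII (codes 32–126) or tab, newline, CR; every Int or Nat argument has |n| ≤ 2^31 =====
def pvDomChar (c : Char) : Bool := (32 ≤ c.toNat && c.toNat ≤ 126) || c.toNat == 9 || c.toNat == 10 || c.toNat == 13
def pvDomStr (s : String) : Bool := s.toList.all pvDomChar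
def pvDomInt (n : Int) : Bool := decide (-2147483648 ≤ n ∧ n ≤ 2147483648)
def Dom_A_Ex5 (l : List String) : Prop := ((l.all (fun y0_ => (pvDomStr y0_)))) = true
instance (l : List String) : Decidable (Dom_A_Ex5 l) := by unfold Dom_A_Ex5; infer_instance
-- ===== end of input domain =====

-- B replaces A's per-element rotated-copy rebuild and inner scan by one dictionary tally pass plus a lookup pass (asymptotically faster).


-- ===== PORT A =====
def A_Ex5 (l : List String) : List (String × Int) :=
  (PySem.List.pyRange 0 (PySem.List.len l) 1).foldl (fun M i =>
    let li := PySem.List.pyGetD l i ""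
    let L := PySem.List.slice l (some i) (some (i+1)) ++
             PySem.List.slice l (some 0) (some i) ++
             PySem.List.slice l (some (i+1)) (some (PySem.List.len l))
    let c := L.foldl (fun c j => if PySem.Str.len j = PySem.Str.len li then c + 1 else c) (0 : Int)
    M ++ [(li, c)]) []

-- ===== PORT B =====
def A_Ex5_alt (l : List String) : List (String × Int) :=
  let counts := l.foldl (fun d s =>
    let k := PySem.Str.len s
    d.insert k (d.getD k 0 + 1)) (PySem.Dict.empty)
  l.map (fun s => (s, counts.getD (PySem.Str.len s) 0))

-- ===== PRECONDITION & SPEC =====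
def Spec_A_Ex5 (l : List String) (out : List (String × Int)) : Prop := out = A_Ex5_alt l
instance (l : List String) (out : List (String × Int)) : Decidable (Spec_A_Ex5 l out) := by unfold Spec_A_Ex5; infer_instance

-- ===== CLAIM (what is proved, stated in full; the proofs are below) =====
def Claim_equal_A_Ex5 : Prop := ∀ (l : List String), Dom_A_Ex5 l → Spec_A_Ex5 l (A_Ex5 l)

-- ===== LEMMAS AND PROOFS =====

-- B's dictionary lookup is the number of elements of l with the given length.
lemma alt_counts_getD (l : List String) (v : Int) :
    (l.foldl (fun d s =>
      let k := PySem.Str.len s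
      d.insert k (d.getD k 0 + 1)) (PySem.Dict.empty)).getD v 0
    = ((l.map PySem.Str.len).count v : Int) := by
  have h : (l.foldl (fun d s =>
      let k := PySem.Str.len s
      d.insert k (d.getD k 0 + 1)) (PySem.Dict.empty : PySem.Dict Int Int))
      = ((l.map PySem.Str.len).foldl (fun d x => d.insert x (d.getD x 0 + 1)) (PySem.Dict.empty)) := by
    rw [List.foldl_map]
  refine (congrArg (fun d => PySem.Dict.getD d v 0) h).trans ?_
  rw [PySem.Dict.getD_foldl_insert_add_one]
  simp [PySem.Dict.getD_empty]

-- A's rotated copy of l at index k is a permutation of l.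
lemma rot_perm (l : List String) (k : Nat) (hk : k < l.length) :
    ([l[k]] ++ l.take k ++ l.drop (k+1)).Perm l := by
  have hsplit : l.take k ++ l[k] :: l.drop (k+1) = l := by
    rw [List.getElem_cons_drop, List.take_append_drop]
  show (l[k] :: (l.take k ++ l.drop (k+1))).Perm l
  calc (l[k] :: (l.take k ++ l.drop (k+1))).Perm (l.take k ++ l[k] :: l.drop (k+1)) :=
        List.perm_middle.symm
    _ = l := hsplit

-- A's inner count at index k equals B's dictionary count.
lemma inner_count (l : List String) (k : Nat) (hk : k < l.length) :
    (([l[k]] ++ l.take k ++ l.drop (k+1)).foldl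
      (fun c j => if PySem.Str.len j = PySem.Str.len l[k] then c + 1 else c) (0 : Int))
    = ((l.map PySem.Str.len).count (PySem.Str.len l[k]) : Int) := by
  rw [PySem.List.foldl_ite_add_one]
  rw [(rot_perm l k hk).countP_eq]
  rw [List.count_eq_countP, List.countP_map, zero_add]
  congr 1

-- ===== VERDICT (by name: the statement is the Claim_ definition above) =====
theorem A_Ex5_spec : Claim_equal_A_Ex5 := by
  intro l _
  unfold Spec_A_Ex5 A_Ex5 A_Ex5_alt
  show (PySem.List.pyRange 0 (PySem.List.len l) 1).foldl (fun M i =>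
      M ++ [(PySem.List.pyGetD l i "",
        (PySem.List.slice l (some i) (some (i+1)) ++
         PySem.List.slice l (some 0) (some i) ++
         PySem.List.slice l (some (i+1)) (some (PySem.List.len l))).foldl
          (fun c j => if PySem.Str.len j = PySem.Str.len (PySem.List.pyGetD l i "") then c + 1 else c)
          (0 : Int))]) [] = _
  rw [PySem.List.foldl_append_singleton_eq_map]
  simp only [PySem.List.len_eq, PySem.List.pyRange_zero_natCast, List.map_map, List.nil_append]
  simp only [alt_counts_getD]
  apply List.ext_getElem
  · simp
  · intro k h1 h2
    have hk : k < l.length := by simpa using h2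
    simp only [List.getElem_map, List.getElem_range, Function.comp_apply]
    have hc : ((k:Int)+1) = ((k+1:Nat):Int) := by push_cast; ring
    have e1 : PySem.List.pyGetD l ((k:Nat):Int) "" = l[k] := by
      rw [PySem.List.pyGetD_natCast, List.getD_eq_getElem _ _ hk]
    have e2 : PySem.List.slice l (some ((k:Nat):Int)) (some (((k:Nat):Int)+1)) = [l[k]] := by
      rw [hc, PySem.List.slice_natCast, ← List.getElem_cons_drop (as := l) (i := k)]
      · simp
      · exact hk
    have e3 : PySem.List.slice l (some (0:Int)) (some ((k:Nat):Int)) = l.take k := by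
      simp [PySem.List.slice_to_natCast]
    have e4 : PySem.List.slice l (some (((k:Nat):Int)+1)) (some ((l.length:Nat):Int)) = l.drop (k+1) := by
      rw [hc, PySem.List.slice_natCast]
      apply List.take_of_length_le
      simp
    rw [e1, e2, e3, e4, inner_count l k hk]
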